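-- pv_equiv track=rewrite | github.com/JanProvaznik/enigma-transformed | src/preprocessing.py | weird
-- ===== SOURCE A (Python) =====
-- def weird(text: str) -> bool:
--     """Returns True if the text is weird, False otherwise.
--
--     Text is weird if any of the following conditions are met:
--     starts with 'European markets'
--     starts with 'Replacements:
--     starts with 'Match details':
--     contains 'http://'
--     contains 'https://'
--     contains more than 20 digits
--     contains more than 15 commas or periods
--     """
--     if text.startswith(('European markets', 'Replacements:', 'Match details')):
--         return True
--     if 'http://' in text or 'https://' in text:
--         return True
--
--     # Count digits
--     if sum(c.isdigit() for c in text) > 20: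
--         return True
--
--     # Count commas and periods
--     comma_period_count = text.count(',') + text.count('.')
--     if comma_period_count > 15:
--         return True
--
--     return False
-- ===== SOURCE B (Python) =====
-- def weird(text: str) -> bool:
--     """Returns True if the text is weird, False otherwise."""
--     if text.startswith(('European markets', 'Replacements:', 'Match details')):
--         return True
--     if 'http://' in text or 'https://' in text:
--         return True
--     digits = 0
--     punct = 0
--     for c in text:
--         if c.isdigit():
--             digits += 1
--             if digits > 20:
--                 return True
--         elif c == ',' or c == '.':
--             punct += 1
--             if punct > 15:
--                 return True
--     return False
-- ===== Notes on version B (the rewrite author's own statement) =====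
-- stated objective: alternative
-- what changed: The separate digit-sum pass and the two .count scans are replaced by one fused single pass over the text that maintains two counters and returns True as soon as a threshold is crossed (short-circuit), instead of counting everything and comparing at the end.
import Mathlib
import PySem

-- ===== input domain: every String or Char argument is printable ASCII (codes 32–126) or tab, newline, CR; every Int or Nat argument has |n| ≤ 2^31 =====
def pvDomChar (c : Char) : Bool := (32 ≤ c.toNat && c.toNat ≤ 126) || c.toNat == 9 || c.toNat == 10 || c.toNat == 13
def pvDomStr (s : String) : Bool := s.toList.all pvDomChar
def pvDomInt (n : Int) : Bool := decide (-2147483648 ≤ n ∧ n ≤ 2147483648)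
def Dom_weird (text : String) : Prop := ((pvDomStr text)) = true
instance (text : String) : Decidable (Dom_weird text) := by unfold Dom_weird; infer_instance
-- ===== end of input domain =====

-- B fuses A's three counting scans into one short-circuiting pass with two counters; same results, alternative decomposition (no speed claim).

-- ===== PORT A =====
def weird (text : String) : Bool :=
  if PySem.Str.startswith text "European markets" || PySem.Str.startswith text "Replacements:"
      || PySem.Str.startswith text "Match details" then
    true
  else if PySem.Str.isIn "http://" text || PySem.Str.isIn "https://" text then
    true
  -- sum(c.isdigit() for c in text): a 0/1 sum over the characters
  else if ((text.toList.map (fun c => if PySem.Chars.isdigit c then (1 : Int) else 0)).sum) > 20 then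
    true
  else
    let comma_period_count : Int := (PySem.Str.count text "," : Int) + (PySem.Str.count text "." : Int)
    if comma_period_count > 15 then true else false

-- ===== PORT B =====
-- the fused 'for c in text' loop of Source B: two counters, early return when a threshold is crossed
def weirdScan : List Char → Int → Int → Bool
  | [], _, _ => false
  | c :: rest, digits, punct =>
    if PySem.Chars.isdigit c then
      if digits + 1 > 20 then true else weirdScan rest (digits + 1) punct
    else if c == ',' || c == '.' then
      if punct + 1 > 15 then true else weirdScan rest digits (punct + 1)
    else
      weirdScan rest digits punct

def weird_alt (text : String) : Bool :=
  if PySem.Str.startswith text "European markets" || PySem.Str.startswith text "Replacements:"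
      || PySem.Str.startswith text "Match details" then
    true
  else if PySem.Str.isIn "http://" text || PySem.Str.isIn "https://" text then
    true
  else
    weirdScan text.toList 0 0

-- ===== PRECONDITION & SPEC =====
def Spec_weird (text : String) (out : Bool) : Prop := out = weird_alt text
instance (text : String) (out : Bool) : Decidable (Spec_weird text out) := by unfold Spec_weird; infer_instance

-- ===== CLAIM (what is proved, stated in full; the proofs are below) =====
def Claim_equal_weird : Prop := ∀ (text : String), Dom_weird text → Spec_weird text (weird text)

-- ===== LEMMAS AND PROOFS =====

-- single-character substring count is the character count
theorem countGo_single (c : Char) (l : List Char) :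
    ∀ acc, PySem.Chars.count.go [c] l.length l acc = acc + l.count c := by
  induction l with
  | nil => intro acc; rfl
  | cons h t ih =>
    intro acc
    have step : PySem.Chars.count.go [c] (h :: t).length (h :: t) acc
        = if [c].isPrefixOf (h :: t) then PySem.Chars.count.go [c] t.length t (acc + 1)
          else PySem.Chars.count.go [c] t.length t acc := rfl
    rw [step]
    by_cases hc : c = h
    · subst hc
      simp [List.isPrefixOf, ih]
      omega
    · simp [List.isPrefixOf, Ne.symm hc, hc, ih]

theorem strCount_single (s : String) (c : Char) (sub : String) (h : sub.toList = [c]) :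
    PySem.Str.count s sub = s.toList.count c := by
  simp [PySem.Str.count_eq, PySem.Chars.count, h]
  simpa [String.length_toList] using countGo_single c s.toList 0

-- B's fused counting loop equals A's two total counts, as long as the counters are under threshold
theorem weirdScan_eq (l : List Char) : ∀ (d p : Int), d ≤ 20 → p ≤ 15 →
    weirdScan l d p =
      (decide (20 < d + (l.countP PySem.Chars.isdigit : Int))
        || decide (15 < p + (l.count ',' : Int) + (l.count '.' : Int))) := by
  induction l with
  | nil => intro d p hd hp; simp [weirdScan]; omega
  | cons c rest ih =>
    intro d p hd hp
    have hcp0 : (0 : Int) ≤ (rest.countP PySem.Chars.isdigit : Int) := Int.natCast_nonneg _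
    have hc0 : (0 : Int) ≤ (rest.count ',' : Int) := Int.natCast_nonneg _
    have hd0 : (0 : Int) ≤ (rest.count '.' : Int) := Int.natCast_nonneg _
    rw [weirdScan]
    by_cases hdig : PySem.Chars.isdigit c
    · have hcm : ¬ (c == ',') = true := by
        simp only [beq_iff_eq]; rintro rfl; simp [PySem.Chars.isdigit] at hdig
      have hpd : ¬ (c == '.') = true := by
        simp only [beq_iff_eq]; rintro rfl; simp [PySem.Chars.isdigit] at hdig
      rw [if_pos hdig, List.countP_cons, List.count_cons, List.count_cons,
        if_pos hdig, if_neg hcm, if_neg hpd, Nat.add_zero, Nat.add_zero]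
      push_cast
      simp only [add_zero]
      by_cases h21 : d + 1 > 20
      · rw [if_pos h21]
        have h : (20 : Int) < d + ((rest.countP PySem.Chars.isdigit : Int) + 1) := by omega
        simp [h]
      · rw [if_neg h21,
          show d + ((rest.countP PySem.Chars.isdigit : Int) + 1)
            = (d + 1) + (rest.countP PySem.Chars.isdigit : Int) by ring,
          ih (d + 1) p (by omega) hp]
    · rw [if_neg hdig, List.countP_cons, if_neg hdig, Nat.add_zero,
        List.count_cons, List.count_cons]
      by_cases hcm : (c == ',') = true
      · have hpd : ¬ (c == '.') = true := by
          simp only [beq_iff_eq] at hcm ⊢; subst hcm; decide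
        rw [if_pos (by simp [hcm]), if_pos hcm, if_neg hpd, Nat.add_zero]
        push_cast
        simp only [add_zero]
        by_cases h16 : p + 1 > 15
        · rw [if_pos h16]
          have h : (15 : Int) < p + ((rest.count ',' : Int) + 1) + (rest.count '.' : Int) := by omega
          simp [h]
        · rw [if_neg h16,
            show p + ((rest.count ',' : Int) + 1) + (rest.count '.' : Int)
              = (p + 1) + (rest.count ',' : Int) + (rest.count '.' : Int) by ring,
            ih d (p + 1) hd (by omega)]
      · by_cases hpd : (c == '.') = true
        · rw [if_pos (by simp [hpd]), if_neg hcm, Nat.add_zero, if_pos hpd]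
          push_cast
          by_cases h16 : p + 1 > 15
          · rw [if_pos h16]
            have h : (15 : Int) < p + (rest.count ',' : Int) + ((rest.count '.' : Int) + 1) := by omega
            simp [h]
          · rw [if_neg h16,
              show p + (rest.count ',' : Int) + ((rest.count '.' : Int) + 1)
                = (p + 1) + (rest.count ',' : Int) + (rest.count '.' : Int) by ring,
              ih d (p + 1) hd (by omega)]
        · rw [if_neg (by simp [hcm, hpd]), if_neg hcm, if_neg hpd, Nat.add_zero, Nat.add_zero]
          exact ih d p hd hp

-- ===== VERDICT (by name: the statement is the Claim_ definition above) =====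
theorem weird_spec : Claim_equal_weird := by
  intro text _
  unfold Spec_weird weird weird_alt
  simp only [PySem.List.sum_map_ite_one_zero,
    strCount_single text ',' "," rfl, strCount_single text '.' "." rfl,
    weirdScan_eq text.toList 0 0 (by norm_num) (by norm_num), zero_add]
  split_ifs with h1 h2 hdig hcp
  · rfl
  · rfl
  · simp [gt_iff_lt] at hdig
    simp [hdig]
  · simp [gt_iff_lt] at hdig hcp
    simp [hcp]
  · symm
    simp only [Bool.or_eq_false_iff, decide_eq_false_iff_not]
    exact ⟨hdig, hcp⟩
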